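-- pv_equiv track=rewrite | github.com/domi1504/sat-project | sat/instance/instance.py | normalize_clauses
-- ===== SOURCE A (Python) =====
-- def normalize_clauses(clauses: list[tuple[int, ...]]) -> list[tuple[int, ...]]:
--     """
--     Normalizes clause variable indices to be contiguous and 1-based.
--
--     Each variable in the input is remapped so that variable indices become [1, ..., n],
--     where n is the number of unique variables.
--
--     :param clauses: List of clauses with arbitrary variable indices.
--     :return: List of normalized clauses with remapped variable indices.
--     """
--
--     # Normalize clauses: 1-based, vars from exactly [1, ..., n]
--     normalized_clauses = []
--
--     # Count variables & create mapping to indices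
--     var_name_map = {}
--     cur_var_name = 1
--     for clause in clauses:
--         for lit in clause:
--             var = abs(lit)
--             if var not in var_name_map.keys():
--                 var_name_map[var] = cur_var_name
--                 cur_var_name += 1
--
--     # Fill normalized clauses
--     for clause in clauses:
--         renamed_clause = tuple((1 if lit > 0 else -1) * var_name_map[abs(lit)] for lit in clause)
--         normalized_clauses.append(renamed_clause)
--
--     return normalized_clauses
-- ===== SOURCE B (Python) =====
-- def normalize_clauses(clauses: list[tuple[int, ...]]) -> list[tuple[int, ...]]:
--     """Single-pass normalization: assign 1-based ids at first appearance while renaming."""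
--     var_name_map = {}
--     normalized_clauses = []
--     for clause in clauses:
--         renamed = []
--         for lit in clause:
--             var = abs(lit)
--             if var not in var_name_map:
--                 var_name_map[var] = len(var_name_map) + 1
--             renamed.append((1 if lit > 0 else -1) * var_name_map[var])
--         normalized_clauses.append(tuple(renamed))
--     return normalized_clauses
-- ===== Notes on version B (the rewrite author's own statement) =====
-- stated objective: simpler
-- what changed: Fuses A's two passes into one: ids are assigned at first appearance (len(map)+1) while renaming, so the separate map-building pass and its counter disappear.
import Mathlib
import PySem

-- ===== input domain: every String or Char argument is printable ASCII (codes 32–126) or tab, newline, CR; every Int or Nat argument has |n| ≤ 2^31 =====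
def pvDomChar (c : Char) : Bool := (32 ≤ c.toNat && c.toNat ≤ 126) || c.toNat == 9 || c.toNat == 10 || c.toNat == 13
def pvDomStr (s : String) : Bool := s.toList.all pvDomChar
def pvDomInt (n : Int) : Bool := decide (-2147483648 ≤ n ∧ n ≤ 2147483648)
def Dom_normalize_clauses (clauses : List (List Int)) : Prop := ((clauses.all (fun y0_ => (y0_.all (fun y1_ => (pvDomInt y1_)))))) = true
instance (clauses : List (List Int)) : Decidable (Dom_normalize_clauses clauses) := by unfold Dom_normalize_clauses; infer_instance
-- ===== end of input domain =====

-- B fuses A's two passes into one, assigning each variable's 1-based id at first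
-- appearance (len(map)+1) while renaming; objective: simpler (same output, one pass).

-- ===== PORT A =====
-- first pass, one literal: record abs(lit) under the next counter value if unseen
def nc_pass1_step (s : PySem.Dict Int Int × Int) (lit : Int) : PySem.Dict Int Int × Int :=
  let var := |lit|
  if s.1.contains var then s else (s.1.insert var s.2, s.2 + 1)

def normalize_clauses (clauses : List (List Int)) : List (List Int) :=
  -- pass 1: count variables & create mapping (cur_var_name starts at 1)
  let s := clauses.foldl (fun s clause => clause.foldl nc_pass1_step s) (PySem.Dict.empty, 1)
  -- pass 2: fill normalized clauses (the keyed lookup never misses; getD 0 is exact here)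
  clauses.foldl (fun acc clause =>
    acc ++ [clause.map (fun lit => (if lit > 0 then (1 : Int) else -1) * (s.1.getD |lit| 0))]) []

-- ===== PORT B =====
-- single pass, one literal: assign id len(map)+1 at first sight, then rename
def nc_lit_step (s : PySem.Dict Int Int × List Int) (lit : Int) : PySem.Dict Int Int × List Int :=
  let var := |lit|
  let m := if s.1.contains var then s.1 else s.1.insert var ((s.1.size : Int) + 1)
  (m, s.2 ++ [(if lit > 0 then (1 : Int) else -1) * (m.getD var 0)])

def normalize_clauses_alt (clauses : List (List Int)) : List (List Int) :=
  (clauses.foldl (fun s clause =>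
      let r := clause.foldl nc_lit_step (s.1, [])
      (r.1, s.2 ++ [r.2]))
    ((PySem.Dict.empty : PySem.Dict Int Int), ([] : List (List Int)))).2

-- ===== PRECONDITION & SPEC =====
def Spec_normalize_clauses (clauses : List (List Int)) (out : List (List Int)) : Prop := out = normalize_clauses_alt clauses
instance (clauses : List (List Int)) (out : List (List Int)) : Decidable (Spec_normalize_clauses clauses out) := by unfold Spec_normalize_clauses; infer_instance

-- ===== CLAIM (what is proved, stated in full; the proofs are below) =====
def Claim_equal_normalize_clauses : Prop := ∀ (clauses : List (List Int)), Dom_normalize_clauses clauses → Spec_normalize_clauses clauses (normalize_clauses clauses)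

-- ===== LEMMAS AND PROOFS =====

-- a single pass-1 step never disturbs an existing binding
theorem nc_step_mono (s : PySem.Dict Int Int × Int) (lit k : Int) (v : Int)
    (h : s.1.get? k = some v) : (nc_pass1_step s lit).1.get? k = some v := by
  unfold nc_pass1_step
  by_cases hc : s.1.contains |lit| = true
  · simp [hc, h]
  · simp only [Bool.not_eq_true] at hc
    simp only [hc]
    have hk : k ≠ |lit| := by
      intro he
      rw [PySem.Dict.contains_eq_isSome_get?] at hc
      rw [← he, h] at hc
      simp at hc
    simp [PySem.Dict.get?_insert_of_ne _ _ hk, h]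

theorem nc_foldl_clause_mono (cl : List Int) (s : PySem.Dict Int Int × Int) (k v : Int)
    (h : s.1.get? k = some v) : ((cl.foldl nc_pass1_step s).1).get? k = some v := by
  induction cl generalizing s with
  | nil => exact h
  | cons x xs ih => exact ih _ (nc_step_mono s x k v h)

theorem nc_foldl_clauses_mono (cls : List (List Int)) (s : PySem.Dict Int Int × Int) (k v : Int)
    (h : s.1.get? k = some v) :
    ((cls.foldl (fun s cl => cl.foldl nc_pass1_step s) s).1).get? k = some v := by
  induction cls generalizing s with
  | nil => exact h
  | cons c cs ih => exact ih _ (nc_foldl_clause_mono c s k v h)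

-- after a pass-1 step the literal's variable is bound
theorem nc_step_present (s : PySem.Dict Int Int × Int) (lit : Int) :
    ∃ v, (nc_pass1_step s lit).1.get? |lit| = some v := by
  unfold nc_pass1_step
  by_cases hc : s.1.contains |lit| = true
  · have hc' := hc
    rw [PySem.Dict.contains_eq_isSome_get?] at hc'
    cases hg : s.1.get? |lit| with
    | none => rw [hg] at hc'; simp at hc'
    | some w => exact ⟨w, by simp [hc, hg]⟩
  · simp only [Bool.not_eq_true] at hc
    exact ⟨s.2, by simp [hc, PySem.Dict.get?_insert_self]⟩

theorem nc_foldl_clause_present (cl : List Int) (lit : Int) :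
    ∀ s : PySem.Dict Int Int × Int, lit ∈ cl →
      ∃ v, ((cl.foldl nc_pass1_step s).1).get? |lit| = some v := by
  induction cl with
  | nil => intro s h; cases h
  | cons x xs ih =>
    intro s h
    rcases List.mem_cons.mp h with he | hm
    · subst he
      obtain ⟨v, hv⟩ := nc_step_present s lit
      exact ⟨v, nc_foldl_clause_mono xs _ _ v hv⟩
    · exact ih _ hm

-- the counter invariant: cur_var_name = len(map) + 1, preserved by a step
theorem nc_step_counter (s : PySem.Dict Int Int × Int) (lit : Int)
    (h : s.2 = (s.1.size : Int) + 1) :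
    (nc_pass1_step s lit).2 = (((nc_pass1_step s lit).1).size : Int) + 1 := by
  unfold nc_pass1_step
  by_cases hc : s.1.contains |lit| = true
  · simpa [hc]
  · simp only [Bool.not_eq_true] at hc
    simp [hc, PySem.Dict.size_insert, h]

theorem nc_foldl_clause_counter (cl : List Int) (s : PySem.Dict Int Int × Int)
    (h : s.2 = (s.1.size : Int) + 1) :
    (cl.foldl nc_pass1_step s).2 = (((cl.foldl nc_pass1_step s).1).size : Int) + 1 := by
  induction cl generalizing s with
  | nil => exact h
  | cons x xs ih => exact ih _ (nc_step_counter s x h)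

-- with the counter invariant, B's per-literal map update is A's pass-1 step
theorem nc_lit_step_map (m : PySem.Dict Int Int) (c : Int) (acc : List Int) (lit : Int)
    (h : c = (m.size : Int) + 1) :
    (nc_lit_step (m, acc) lit).1 = (nc_pass1_step (m, c) lit).1 := by
  unfold nc_lit_step nc_pass1_step
  by_cases hc : m.contains |lit| = true
  · simp [hc]
  · simp only [Bool.not_eq_true] at hc
    simp [hc, h]

-- B's inner loop over a clause = A's pass-1 map plus the clause rendered through it
theorem nc_inner (cl : List Int) (m : PySem.Dict Int Int) (c : Int) (acc : List Int)
    (h : c = (m.size : Int) + 1) :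
    cl.foldl nc_lit_step (m, acc) =
      ((cl.foldl nc_pass1_step (m, c)).1,
       acc ++ cl.map (fun lit =>
         (if lit > 0 then (1 : Int) else -1) * ((cl.foldl nc_pass1_step (m, c)).1.getD |lit| 0))) := by
  induction cl generalizing m c acc with
  | nil => simp
  | cons x xs ih =>
    have hmap := nc_lit_step_map m c acc x h
    have hcnt := nc_step_counter (m, c) x h
    -- the value written for x is stable under the rest of the pass
    obtain ⟨v, hv⟩ := nc_step_present (m, c) x
    have hvfin : ((xs.foldl nc_pass1_step (nc_pass1_step (m, c) x)).1).get? |x| = some v :=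
      nc_foldl_clause_mono xs _ _ v hv
    have hval : (nc_lit_step (m, acc) x).1.getD |x| 0
        = ((xs.foldl nc_pass1_step (nc_pass1_step (m, c) x)).1).getD |x| 0 := by
      rw [hmap, PySem.Dict.getD_of_get?_eq_some _ _ hv,
          PySem.Dict.getD_of_get?_eq_some _ _ hvfin]
    have hstep : nc_lit_step (m, acc) x
        = ((nc_pass1_step (m, c) x).1,
           acc ++ [(if x > 0 then (1 : Int) else -1) * ((nc_lit_step (m, acc) x).1.getD |x| 0)]) := by
      rw [← hmap]; rfl
    calc (x :: xs).foldl nc_lit_step (m, acc)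
        = xs.foldl nc_lit_step (nc_lit_step (m, acc) x) := rfl
      _ = _ := by
          rw [hstep, ih _ _ _ hcnt]
          have hfold : xs.foldl nc_pass1_step (nc_pass1_step (m, c) x)
              = xs.foldl nc_pass1_step
                  ((nc_pass1_step (m, c) x).1, (nc_pass1_step (m, c) x).2) := by rfl
          simp only [List.foldl_cons, ← hfold, List.map_cons, hval]
          simp [List.append_assoc]

-- every binding present after a clause's pass-1 survives the remaining clauses,
-- so rendering through the clause-local map equals rendering through the final map
theorem nc_render_stable (cl : List Int) (cls : List (List Int)) (s : PySem.Dict Int Int × Int) :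
    cl.map (fun lit => (if lit > 0 then (1 : Int) else -1)
        * ((cl.foldl nc_pass1_step s).1.getD |lit| 0))
    = cl.map (fun lit => (if lit > 0 then (1 : Int) else -1)
        * (((cls.foldl (fun s cl => cl.foldl nc_pass1_step s) (cl.foldl nc_pass1_step s)).1).getD |lit| 0)) := by
  apply List.map_congr_left
  intro lit hmem
  obtain ⟨v, hv⟩ := nc_foldl_clause_present cl lit s hmem
  have hvfin := nc_foldl_clauses_mono cls _ _ v hv
  rw [PySem.Dict.getD_of_get?_eq_some _ _ hv,
      PySem.Dict.getD_of_get?_eq_some _ _ hvfin]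

-- B's outer loop = the clauses rendered through the full pass-1 map
theorem nc_outer (cls : List (List Int)) (m : PySem.Dict Int Int) (c : Int)
    (acc : List (List Int)) (h : c = (m.size : Int) + 1) :
    (cls.foldl (fun s clause =>
        let r := clause.foldl nc_lit_step (s.1, [])
        (r.1, s.2 ++ [r.2])) (m, acc)).2
    = acc ++ cls.map (fun cl => cl.map (fun lit =>
        (if lit > 0 then (1 : Int) else -1)
        * (((cls.foldl (fun s cl => cl.foldl nc_pass1_step s) (m, c)).1).getD |lit| 0))) := by
  induction cls generalizing m c acc with
  | nil => simp
  | cons cl cls ih =>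
    have hin := nc_inner cl m c [] h
    have hcnt := nc_foldl_clause_counter cl (m, c) h
    have hfold : cl.foldl nc_pass1_step (m, c)
        = ((cl.foldl nc_pass1_step (m, c)).1, (cl.foldl nc_pass1_step (m, c)).2) := rfl
    simp only [List.foldl_cons, hin]
    rw [ih _ _ _ hcnt]
    rw [← hfold]
    rw [nc_render_stable cl cls (m, c)]
    simp [List.append_assoc]

-- A's second pass (append-fold) is a map
theorem nc_foldl_append_map (cls : List (List Int)) (f : List Int → List Int)
    (acc : List (List Int)) :
    cls.foldl (fun acc cl => acc ++ [f cl]) acc = acc ++ cls.map f := by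
  induction cls generalizing acc with
  | nil => simp
  | cons c cs ih => simp [ih, List.append_assoc]

-- ===== VERDICT (by name: the statement is the Claim_ definition above) =====
theorem normalize_clauses_spec : Claim_equal_normalize_clauses := by
  intro clauses _
  unfold Spec_normalize_clauses normalize_clauses normalize_clauses_alt
  rw [nc_outer clauses PySem.Dict.empty 1 [] (by simp [PySem.Dict.size_empty])]
  rw [nc_foldl_append_map]
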